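-- pv_equiv track=rewrite | github.com/vi5hnuu/c_c--_python | python_revision/py files/problem13.9.py | create_sent1
-- ===== SOURCE A (Python) =====
-- def create_sent1(sub,ver,obj):
--     lst=[]
--     for x in range(len(sub)):
--         for y in range(len(ver)):
--             for z in range(len(obj)):
--                 sent=sub[x]+' '+ver[y]+' '+obj[z]
--                 lst.append(sent)
--     return lst
-- ===== SOURCE B (Python) =====
-- def create_sent1(sub, ver, obj):
--     # Incremental Cartesian product: start from sub, extend by each remaining list.
--     acc = list(sub)
--     for layer in (ver, obj):
--         acc = [p + ' ' + e for p in acc for e in layer]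
--     return acc
-- ===== Notes on version B (the rewrite author's own statement) =====
-- stated objective: alternative
-- what changed: Replaces the fixed triple-nested index loop with an incremental Cartesian product: an accumulator initialized to sub is rebuilt once per remaining list (ver, then obj) by a product comprehension.
import Mathlib
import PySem

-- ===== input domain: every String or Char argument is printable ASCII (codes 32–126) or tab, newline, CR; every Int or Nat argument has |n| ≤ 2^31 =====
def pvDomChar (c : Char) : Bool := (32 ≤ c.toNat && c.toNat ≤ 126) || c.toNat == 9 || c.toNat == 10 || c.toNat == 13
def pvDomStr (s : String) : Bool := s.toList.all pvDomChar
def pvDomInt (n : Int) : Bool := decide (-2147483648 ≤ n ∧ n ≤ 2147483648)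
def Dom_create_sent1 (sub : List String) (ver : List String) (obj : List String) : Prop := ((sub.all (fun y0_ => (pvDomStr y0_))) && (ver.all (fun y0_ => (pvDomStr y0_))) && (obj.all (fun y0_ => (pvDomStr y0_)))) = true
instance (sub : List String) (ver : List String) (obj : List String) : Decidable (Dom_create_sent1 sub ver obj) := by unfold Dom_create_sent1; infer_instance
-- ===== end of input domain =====

-- B computes the same Cartesian product incrementally (accumulator rebuilt once per
-- remaining list) instead of A's fixed triple-nested index loop; objective: alternative.

-- ===== PORT A =====
-- Triple nested 'for x in range(len(sub))' loops appending sub[x]+' '+ver[y]+' '+obj[z].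
-- Indices drawn from range(len(·)) are always in range, so pyGetD with a dummy default
-- is exact here (pyGet? never returns none on these indices).
def create_sent1 (sub : List String) (ver : List String) (obj : List String) : List String :=
  (PySem.List.pyRange 0 (PySem.List.len sub) 1).foldl (fun lst x =>
    (PySem.List.pyRange 0 (PySem.List.len ver) 1).foldl (fun lst y =>
      (PySem.List.pyRange 0 (PySem.List.len obj) 1).foldl (fun lst z =>
        lst ++ [PySem.List.pyGetD sub x "" ++ " " ++ PySem.List.pyGetD ver y "" ++ " " ++ PySem.List.pyGetD obj z ""]) lst) lst) []

-- ===== PORT B =====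
-- acc = list(sub); for layer in (ver, obj): acc = [p+' '+e for p in acc for e in layer]
def create_sent1_alt (sub : List String) (ver : List String) (obj : List String) : List String :=
  [ver, obj].foldl (fun acc layer => acc.flatMap (fun p => layer.map (fun e => p ++ " " ++ e))) sub

-- ===== PRECONDITION & SPEC =====
def Spec_create_sent1 (sub : List String) (ver : List String) (obj : List String) (out : List String) : Prop := out = create_sent1_alt sub ver obj
instance (sub : List String) (ver : List String) (obj : List String) (out : List String) : Decidable (Spec_create_sent1 sub ver obj out) := by unfold Spec_create_sent1; infer_instance

-- ===== CLAIM (what is proved, stated in full; the proofs are below) =====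
def Claim_equal_create_sent1 : Prop := ∀ (sub : List String) (ver : List String) (obj : List String), Dom_create_sent1 sub ver obj → Spec_create_sent1 sub ver obj (create_sent1 sub ver obj)

-- ===== LEMMAS AND PROOFS =====
-- The innermost loop (over obj) appends one map-block.
theorem create_sent1_inner_loop (s : String) (vl obj : List String) (init : List String) :
    vl.foldl (fun lst v => (PySem.List.pyRange 0 (PySem.List.len obj) 1).foldl (fun lst z =>
        lst ++ [s ++ " " ++ v ++ " " ++ PySem.List.pyGetD obj z ""]) lst) init
      = init ++ vl.flatMap (fun v => obj.map (fun o => s ++ " " ++ v ++ " " ++ o)) := by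
  induction vl generalizing init with
  | nil => simp
  | cons v tv ihv =>
    simp only [List.foldl_cons]
    rw [PySem.List.foldl_pyRange_zero_pyGetD obj ""
        (fun lst o => lst ++ [s ++ " " ++ v ++ " " ++ o]) init,
      PySem.List.foldl_append_singleton_eq_map, ihv]
    simp [List.flatMap_cons, List.append_assoc]

-- Both sides equal the nested-flatMap normal form of the product.
theorem create_sent1_eq_flatMap (sub ver obj : List String) :
    create_sent1 sub ver obj
      = sub.flatMap (fun s => ver.flatMap (fun v => obj.map (fun o => s ++ " " ++ v ++ " " ++ o))) := by
  unfold create_sent1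
  rw [PySem.List.foldl_pyRange_zero_pyGetD sub ""
      (fun lst s => (PySem.List.pyRange 0 (PySem.List.len ver) 1).foldl (fun lst y =>
        (PySem.List.pyRange 0 (PySem.List.len obj) 1).foldl (fun lst z =>
          lst ++ [s ++ " " ++ PySem.List.pyGetD ver y "" ++ " " ++ PySem.List.pyGetD obj z ""]) lst) lst) []]
  have hmid : ∀ (init : List String),
      sub.foldl (fun lst s => (PySem.List.pyRange 0 (PySem.List.len ver) 1).foldl (fun lst y =>
        (PySem.List.pyRange 0 (PySem.List.len obj) 1).foldl (fun lst z =>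
          lst ++ [s ++ " " ++ PySem.List.pyGetD ver y "" ++ " " ++ PySem.List.pyGetD obj z ""]) lst) lst) init
      = init ++ sub.flatMap (fun s => ver.flatMap (fun v => obj.map (fun o => s ++ " " ++ v ++ " " ++ o))) := by
    intro init
    induction sub generalizing init with
    | nil => simp
    | cons s t ih =>
      simp only [List.foldl_cons]
      rw [PySem.List.foldl_pyRange_zero_pyGetD ver ""
          (fun lst v => (PySem.List.pyRange 0 (PySem.List.len obj) 1).foldl (fun lst z =>
            lst ++ [s ++ " " ++ v ++ " " ++ PySem.List.pyGetD obj z ""]) lst) init,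
        create_sent1_inner_loop, ih]
      simp [List.flatMap_cons, List.append_assoc]
  rw [hmid, List.nil_append]

theorem create_sent1_alt_eq_flatMap (sub ver obj : List String) :
    create_sent1_alt sub ver obj
      = sub.flatMap (fun s => ver.flatMap (fun v => obj.map (fun o => s ++ " " ++ v ++ " " ++ o))) := by
  unfold create_sent1_alt
  simp only [List.foldl_cons, List.foldl_nil, List.flatMap_assoc]
  congr 1; funext s
  rw [List.map_eq_flatMap, List.flatMap_assoc]
  congr 1; funext v
  simp [String.append_assoc]

-- ===== VERDICT (by name: the statement is the Claim_ definition above) =====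
theorem create_sent1_spec : Claim_equal_create_sent1 := by
  intro sub ver obj _
  unfold Spec_create_sent1
  rw [create_sent1_eq_flatMap, create_sent1_alt_eq_flatMap]
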